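-- pv_equiv track=rewrite | github.com/posl/comment_recommendation | script/mod_gen/5_time/ja/216_C/1.py | solve
-- ===== SOURCE A (Python) =====
-- def solve(n):
--     ans = []
--     while n != 0:
--         if n % 2 == 0:
--             n //= 2
--             ans.append('B')
--         else:
--             n -= 1
--             ans.append('A')
--     return ans[::-1]
-- ===== SOURCE B (Python) =====
-- def _bits(n):
--     # most-significant-first binary digits of n (empty otherwise)
--     return _bits(n // 2) + [n % 2] if n > 0 else []
--
-- def solve(n):
--     bs = _bits(n)
--     if not bs:
--         return []
--     return ['A'] + [x for b in bs[1:] for x in (['B', 'A'] if b else ['B'])]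
-- ===== Notes on version B (the rewrite author's own statement) =====
-- stated objective: simpler
-- what changed: A extracts bits in a LSB-first while loop (halving/decrementing) appending letters and reverses at the end; B precomputes the MSB-first binary digit list and builds the answer forward in one comprehension ('A' for the leading bit, then 'B' plus 'A' per set bit).
-- outside the precondition, e.g. on solve(-1): A does not finish within the time limit, B returns []
import Mathlib
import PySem

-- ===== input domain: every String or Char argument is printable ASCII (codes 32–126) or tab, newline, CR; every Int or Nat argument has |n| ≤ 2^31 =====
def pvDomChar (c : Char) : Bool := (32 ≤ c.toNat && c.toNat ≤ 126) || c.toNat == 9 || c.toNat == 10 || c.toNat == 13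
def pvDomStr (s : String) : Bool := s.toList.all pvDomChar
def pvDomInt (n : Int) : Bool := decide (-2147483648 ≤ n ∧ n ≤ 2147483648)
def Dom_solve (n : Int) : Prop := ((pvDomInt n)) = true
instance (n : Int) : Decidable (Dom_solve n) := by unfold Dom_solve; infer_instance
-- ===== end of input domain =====

-- B replaces A's extract-bits-backwards-then-reverse loop by a forward MSB→LSB pass over a
-- precomputed binary-digit list (objective: simpler).

-- ===== PORT A =====
-- while n != 0: … ; the 'n ≤ 0' guard only totalizes the loop (A diverges for n < 0,
-- excluded by Pre_solve; at n = 0 it is exactly the loop exit).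
def solveLoop (n : Int) (ans : List String) : List String :=
  if _h : n ≤ 0 then ans
  else if PySem.Int.mod n 2 = 0 then
    solveLoop (PySem.Int.floordiv n 2) (ans ++ ["B"])
  else
    solveLoop (n - 1) (ans ++ ["A"])
termination_by n.toNat
decreasing_by
  · rw [PySem.Int.floordiv_eq_ediv_of_pos (by omega)]; omega
  · omega

def solve (n : Int) : List String := (solveLoop n []).reverse  -- ans[::-1]

-- ===== PORT B =====
def pvBits (n : Int) : List Int :=
  if _h : 0 < n then pvBits (PySem.Int.floordiv n 2) ++ [PySem.Int.mod n 2] else []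
termination_by n.toNat
decreasing_by
  rw [PySem.Int.floordiv_eq_ediv_of_pos (by omega)]; omega

def solve_alt (n : Int) : List String :=
  match pvBits n with
  | [] => []
  | _ :: rest => "A" :: rest.flatMap (fun b => if b ≠ 0 then ["B", "A"] else ["B"])

-- ===== PRECONDITION & SPEC =====
-- Pre_solve excludes n < 0, on which A's while loop never terminates (no return value).
def Pre_solve (n : Int) : Prop := 0 ≤ n
instance (n : Int) : Decidable (Pre_solve n) := by unfold Pre_solve; infer_instance
def pvWitness_solve : Int := (6)

def Spec_solve (n : Int) (out : List String) : Prop := out = solve_alt n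
instance (n : Int) (out : List String) : Decidable (Spec_solve n out) := by unfold Spec_solve; infer_instance

-- ===== CLAIM (what is proved, stated in full; the proofs are below) =====
def Claim_equal_solve : Prop := ∀ (n : Int), Dom_solve n → Pre_solve n → Spec_solve n (solve n)

-- ===== LEMMAS AND PROOFS =====

lemma solveLoop_eq (n : Int) (ans : List String) :
    solveLoop n ans = if n ≤ 0 then ans
      else if PySem.Int.mod n 2 = 0 then solveLoop (PySem.Int.floordiv n 2) (ans ++ ["B"])
      else solveLoop (n - 1) (ans ++ ["A"]) := by
  rw [solveLoop]
  by_cases h : n ≤ 0 <;> simp [h]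

lemma floordiv_lt_self {n : Int} (h : ¬ n ≤ 0) :
    (PySem.Int.floordiv n 2).toNat < n.toNat := by
  rw [PySem.Int.floordiv_eq_ediv_of_pos (by omega)]; omega

lemma solveLoop_append (n : Int) (ans : List String) :
    solveLoop n ans = ans ++ solveLoop n [] := by
  by_cases h : n ≤ 0
  · rw [solveLoop_eq n ans, solveLoop_eq n [], if_pos h, if_pos h]; simp
  · rw [solveLoop_eq n ans, solveLoop_eq n [], if_neg h, if_neg h]
    by_cases he : PySem.Int.mod n 2 = 0
    · rw [if_pos he, if_pos he,
        solveLoop_append (PySem.Int.floordiv n 2) (ans ++ ["B"]),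
        solveLoop_append (PySem.Int.floordiv n 2) ([] ++ ["B"])]
      simp
    · rw [if_neg he, if_neg he,
        solveLoop_append (n - 1) (ans ++ ["A"]),
        solveLoop_append (n - 1) ([] ++ ["A"])]
      simp
termination_by n.toNat
decreasing_by
  · exact floordiv_lt_self h
  · exact floordiv_lt_self h
  · omega
  · omega

lemma pvBits_zero : pvBits 0 = [] := by rw [pvBits]; simp

lemma solve_alt_zero : solve_alt 0 = [] := by unfold solve_alt; rw [pvBits_zero]

lemma solve_zero : solve 0 = solve_alt 0 := by
  unfold solve
  rw [solveLoop_eq, if_pos (by norm_num), solve_alt_zero]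
  rfl

lemma pvBits_ne_nil {n : Int} (h : 0 < n) : pvBits n ≠ [] := by
  rw [pvBits, dif_pos h]; simp

lemma solve_alt_even {n : Int} (h : 0 < n) (he : PySem.Int.mod n 2 = 0) :
    solve_alt n = solve_alt (PySem.Int.floordiv n 2) ++ ["B"] := by
  have h2 : 0 < PySem.Int.floordiv n 2 := by
    rw [PySem.Int.mod_eq_emod_of_pos (by omega)] at he
    rw [PySem.Int.floordiv_eq_ediv_of_pos (by omega)]
    omega
  have hb : pvBits n = pvBits (PySem.Int.floordiv n 2) ++ [0] := by
    rw [pvBits, dif_pos h, he]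
  obtain ⟨b, rest, hr⟩ : ∃ b rest, pvBits (PySem.Int.floordiv n 2) = b :: rest := by
    cases hx : pvBits (PySem.Int.floordiv n 2) with
    | nil => exact absurd hx (pvBits_ne_nil h2)
    | cons b rest => exact ⟨b, rest, rfl⟩
  unfold solve_alt
  rw [hb, hr]
  simp

lemma solve_alt_odd {n : Int} (h : 0 < n) (ho : PySem.Int.mod n 2 ≠ 0) :
    solve_alt n = solve_alt (n - 1) ++ ["A"] := by
  have hm1 : PySem.Int.mod n 2 = 1 := by
    rw [PySem.Int.mod_eq_emod_of_pos (by omega)] at ho ⊢; omega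
  by_cases h1 : n = 1
  · subst h1
    have hb1 : pvBits 1 = [1] := by
      rw [pvBits, dif_pos (by norm_num),
        show PySem.Int.floordiv 1 2 = 0 by decide, pvBits_zero,
        show PySem.Int.mod 1 2 = 1 by decide]
      rfl
    unfold solve_alt
    rw [hb1, show (1 : Int) - 1 = 0 by norm_num, pvBits_zero]
    rfl
  · have h3 : 0 < n - 1 := by
      rw [PySem.Int.mod_eq_emod_of_pos (by omega)] at hm1; omega
    have hdiv : PySem.Int.floordiv (n - 1) 2 = PySem.Int.floordiv n 2 := by
      rw [PySem.Int.mod_eq_emod_of_pos (by omega)] at hm1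
      rw [PySem.Int.floordiv_eq_ediv_of_pos (by omega),
          PySem.Int.floordiv_eq_ediv_of_pos (by omega)]
      omega
    have hmod : PySem.Int.mod (n - 1) 2 = 0 := by
      rw [PySem.Int.mod_eq_emod_of_pos (by omega)] at hm1 ⊢
      omega
    have h2 : 0 < PySem.Int.floordiv n 2 := by
      rw [PySem.Int.mod_eq_emod_of_pos (by omega)] at hm1
      rw [PySem.Int.floordiv_eq_ediv_of_pos (by omega)]
      omega
    have hbn : pvBits n = pvBits (PySem.Int.floordiv n 2) ++ [1] := by
      rw [pvBits, dif_pos h, hm1]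
    have hbp : pvBits (n - 1) = pvBits (PySem.Int.floordiv n 2) ++ [0] := by
      rw [pvBits, dif_pos h3, hdiv, hmod]
    obtain ⟨b, rest, hr⟩ : ∃ b rest, pvBits (PySem.Int.floordiv n 2) = b :: rest := by
      cases hx : pvBits (PySem.Int.floordiv n 2) with
      | nil => exact absurd hx (pvBits_ne_nil h2)
      | cons b rest => exact ⟨b, rest, rfl⟩
    unfold solve_alt
    rw [hbn, hbp, hr]
    simp

lemma solve_eq_alt : ∀ (k : Nat) (n : Int), 0 ≤ n → n.toNat ≤ k → solve n = solve_alt n := by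
  intro k
  induction k with
  | zero =>
    intro n hn hk
    have h0 : n = 0 := by omega
    rw [h0]; exact solve_zero
  | succ k ih =>
    intro n hn hk
    by_cases h0 : n = 0
    · rw [h0]; exact solve_zero
    · have hpos : 0 < n := by omega
      unfold solve
      rw [solveLoop_eq, if_neg (by omega : ¬ n ≤ 0)]
      by_cases he : PySem.Int.mod n 2 = 0
      · have hlt : (PySem.Int.floordiv n 2).toNat ≤ k := by
          have := floordiv_lt_self (show ¬ n ≤ 0 by omega); omega
        rw [if_pos he, solveLoop_append, List.reverse_append]
        have hrec := ih (PySem.Int.floordiv n 2)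
          (by rw [PySem.Int.floordiv_eq_ediv_of_pos (by omega)]; omega) hlt
        unfold solve at hrec
        rw [solve_alt_even hpos he, ← hrec]
        simp
      · have hlt : (n - 1).toNat ≤ k := by omega
        rw [if_neg he, solveLoop_append, List.reverse_append]
        have hrec := ih (n - 1) (by omega) hlt
        unfold solve at hrec
        rw [solve_alt_odd hpos he, ← hrec]
        simp

-- ===== VERDICT (by name: the statement is the Claim_ definition above) =====
theorem solve_spec : Claim_equal_solve := by
  intro n _ hpre
  unfold Spec_solve
  exact solve_eq_alt n.toNat n hpre le_rfl
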